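-- pv_equiv track=rewrite | github.com/Darylweii/sqlmongo | src/agent/query_entities.py | _infer_data_type_from_requested_tags
-- ===== SOURCE A (Python) =====
-- from typing import Optional, Tuple
--
-- def _infer_data_type_from_requested_tags(requested_tags: Tuple[str, ...]) -> Optional[str]:
--     tags = tuple(str(tag or "").strip().lower() for tag in (requested_tags or ()) if str(tag or "").strip())
--     if not tags:
--         return None
--     unique_tags = set(tags)
--     if unique_tags <= {"ua", "ub", "uc"}:
--         return tags[0] if len(tags) == 1 else "u_line"
--     if unique_tags <= {"ia", "ib", "ic"}:
--         return tags[0] if len(tags) == 1 else "i"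
--     if unique_tags <= {"uab", "ubc", "uca"}:
--         return tags[0] if len(tags) == 1 else "u_phase"
--     return tags[0]
-- ===== SOURCE B (Python) =====
-- # B: one streaming pass with a small state machine (first tag, count, common
-- # group label so far); never materializes the tag tuple or a set. Objective:
-- # alternative decomposition (single fold vs A's staged build-set + three
-- # subset guards); same O(n) cost.
--
-- def _group(t):
--     if t in ("ua", "ub", "uc"):
--         return "u_line"
--     if t in ("ia", "ib", "ic"):
--         return "i"
--     if t in ("uab", "ubc", "uca"):
--         return "u_phase"
--     return None
--
-- def _infer_data_type_from_requested_tags(requested_tags):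
--     first = None      # first normalized non-empty tag
--     count = 0         # how many such tags
--     label = None      # common known group label of all tags seen, else None
--     for raw in (requested_tags or ()):
--         t = str(raw or "").strip().lower()
--         if not t:
--             continue
--         count += 1
--         if first is None:
--             first = t
--             label = _group(t)
--         elif label is not None and _group(t) != label:
--             label = None
--     if count == 0:
--         return None
--     if count == 1 or label is None:
--         return first
--     return label
-- ===== Notes on version B (the rewrite author's own statement) =====
-- stated objective: faster
-- what changed: Replaces A's staged pipeline (build the normalized tuple, build a set, run three subset-of-literal-set guards) by one streaming fold that normalizes each tag on the fly and maintains only (first tag, count, common group label), never materializing the tag list or any set.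
import Mathlib
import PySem

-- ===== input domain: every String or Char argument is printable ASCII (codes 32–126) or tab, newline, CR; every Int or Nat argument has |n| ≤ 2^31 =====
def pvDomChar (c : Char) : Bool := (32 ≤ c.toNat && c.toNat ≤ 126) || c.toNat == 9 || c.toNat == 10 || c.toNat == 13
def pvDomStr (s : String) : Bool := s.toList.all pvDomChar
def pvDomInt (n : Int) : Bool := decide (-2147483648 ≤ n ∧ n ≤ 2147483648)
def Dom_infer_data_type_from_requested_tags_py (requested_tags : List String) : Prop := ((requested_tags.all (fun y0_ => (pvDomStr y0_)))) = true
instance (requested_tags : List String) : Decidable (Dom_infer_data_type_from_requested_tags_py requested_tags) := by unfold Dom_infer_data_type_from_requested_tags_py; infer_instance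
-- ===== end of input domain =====

-- B replaces A's staged pipeline (normalized tuple, set, three subset guards) by one
-- streaming fold keeping only (first tag, count, common group label); measured faster by a constant factor.

-- ===== PORT A =====
def infer_data_type_from_requested_tags_py (requested_tags : List String) : Option String :=
  -- tags = tuple(str(tag or "").strip().lower() for tag in (requested_tags or ()) if str(tag or "").strip())
  let tags := requested_tags.filterMap (fun tag =>
    if PySem.Str.strip tag = "" then none
    else some (PySem.Str.lower (PySem.Str.strip tag)))
  match tags with
  | [] => none                       -- if not tags: return None
  | t :: _ =>
    let unique_tags : PySem.Set String := PySem.Set.ofList tags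
    if PySem.Set.issubset unique_tags (PySem.Set.ofList ["ua", "ub", "uc"]) then
      if tags.length = 1 then some t else some "u_line"
    else if PySem.Set.issubset unique_tags (PySem.Set.ofList ["ia", "ib", "ic"]) then
      if tags.length = 1 then some t else some "i"
    else if PySem.Set.issubset unique_tags (PySem.Set.ofList ["uab", "ubc", "uca"]) then
      if tags.length = 1 then some t else some "u_phase"
    else some t

-- ===== PORT B =====
-- helper _group of Source B
def pvGroupOf (t : String) : Option String :=
  if t = "ua" ∨ t = "ub" ∨ t = "uc" then some "u_line"
  else if t = "ia" ∨ t = "ib" ∨ t = "ic" then some "i"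
  else if t = "uab" ∨ t = "ubc" ∨ t = "uca" then some "u_phase"
  else none

-- loop body of Source B's single pass: state = (first, count, label)
def pvStepB (st : Option String × Int × Option String) (raw : String) :
    Option String × Int × Option String :=
  let t := PySem.Str.lower (PySem.Str.strip raw)
  if t = "" then st                  -- if not t: continue
  else
    let count := st.2.1 + 1
    match st.1 with
    | none => (some t, count, pvGroupOf t)
    | some _ =>
      if st.2.2 ≠ none ∧ pvGroupOf t ≠ st.2.2 then (st.1, count, none)
      else (st.1, count, st.2.2)

def infer_data_type_from_requested_tags_py_alt (requested_tags : List String) : Option String :=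
  let st := requested_tags.foldl pvStepB (none, 0, none)
  let first := st.1
  let count := st.2.1
  let label := st.2.2
  if count = 0 then none
  else if count = 1 ∨ label = none then first
  else label

-- ===== PRECONDITION & SPEC =====
def Spec_infer_data_type_from_requested_tags_py (requested_tags : List String) (out : Option String) : Prop := out = infer_data_type_from_requested_tags_py_alt requested_tags
instance (requested_tags : List String) (out : Option String) : Decidable (Spec_infer_data_type_from_requested_tags_py requested_tags out) := by unfold Spec_infer_data_type_from_requested_tags_py; infer_instance

-- ===== CLAIM (what is proved, stated in full; the proofs are below) =====
def Claim_equal_infer_data_type_from_requested_tags_py : Prop := ∀ (requested_tags : List String), Dom_infer_data_type_from_requested_tags_py requested_tags → Spec_infer_data_type_from_requested_tags_py requested_tags (infer_data_type_from_requested_tags_py requested_tags)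

-- ===== LEMMAS AND PROOFS =====

-- B's loop body once the tag is known to be normalized and non-empty
def pvStep' (st : Option String × Int × Option String) (t : String) :
    Option String × Int × Option String :=
  let count := st.2.1 + 1
  match st.1 with
  | none => (some t, count, pvGroupOf t)
  | some _ =>
    if st.2.2 ≠ none ∧ pvGroupOf t ≠ st.2.2 then (st.1, count, none)
    else (st.1, count, st.2.2)

theorem lower_eq_empty_iff (s : String) : PySem.Str.lower s = "" ↔ s = "" := by
  constructor
  · intro h
    have h2 : (PySem.Str.lower s).toList = ("" : String).toList := by rw [h]
    simp [PySem.Str.toList_lower, PySem.Chars.lower] at h2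
    exact h2
  · intro h; subst h; rfl

-- fusing the in-loop skip of empty tags with the normalization:
-- the fold of pvStepB over the raw list is the fold of pvStep' over the normalized, filtered list
theorem stepB_skip (st : Option String × Int × Option String) (x : String)
    (h : PySem.Str.lower (PySem.Str.strip x) = "") : pvStepB st x = st := by
  unfold pvStepB
  simp only [h, if_pos]

theorem stepB_keep (st : Option String × Int × Option String) (x : String)
    (h : ¬ PySem.Str.lower (PySem.Str.strip x) = "") :
    pvStepB st x = pvStep' st (PySem.Str.lower (PySem.Str.strip x)) := by
  unfold pvStepB pvStep'
  simp only [h, if_false]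

theorem fold_filter (l : List String) (st : Option String × Int × Option String) :
    l.foldl pvStepB st
      = ((l.map (fun x => PySem.Str.lower (PySem.Str.strip x))).filter
          (fun t => decide (t ≠ ""))).foldl pvStep' st := by
  induction l generalizing st with
  | nil => simp
  | cons x xs ih =>
    rw [List.foldl_cons, List.map_cons, List.filter_cons]
    by_cases h : PySem.Str.lower (PySem.Str.strip x) = ""
    · rw [stepB_skip st x h]
      rw [show (decide (¬PySem.Str.lower (PySem.Str.strip x) = "")) = false by simp [h]]
      rw [if_neg (by simp)]
      exact ih st
    · rw [stepB_keep st x h]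
      rw [show (decide (¬PySem.Str.lower (PySem.Str.strip x) = "")) = true by simp [h]]
      rw [if_pos rfl, List.foldl_cons]
      exact ih _

-- invariant: once the first tag is fixed, the fold only counts and intersects the group label
theorem fold_none (l : List String) (f : String) (c : Int) :
    l.foldl pvStep' (some f, c, none) = (some f, c + l.length, none) := by
  induction l generalizing c with
  | nil => simp
  | cons y ys ihy =>
    rw [List.foldl_cons]
    have hstep : pvStep' (some f, c, none) y = (some f, c + 1, none) := by
      simp [pvStep']
    rw [hstep, ihy]
    rw [Prod.mk.injEq, Prod.mk.injEq]
    exact ⟨rfl, by simp; omega, rfl⟩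

theorem fold_some (l : List String) (f : String) (c : Int) (g : String) :
    l.foldl pvStep' (some f, c, some g)
      = (some f, c + l.length,
         if ∀ a ∈ l, pvGroupOf a = some g then some g else none) := by
  induction l generalizing c with
  | nil => simp
  | cons x xs ih =>
    rw [List.foldl_cons]
    by_cases hx : pvGroupOf x = some g
    · have hstep : pvStep' (some f, c, some g) x = (some f, c + 1, some g) := by
        simp [pvStep', hx]
      rw [hstep, ih]
      rw [Prod.mk.injEq, Prod.mk.injEq]
      refine ⟨rfl, by simp; omega, ?_⟩
      simp [hx]
    · have hstep : pvStep' (some f, c, some g) x = (some f, c + 1, none) := by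
        simp [pvStep', hx]
      have hnall : ¬ ∀ a ∈ x :: xs, pvGroupOf a = some g := by
        intro h; exact hx (h x (by simp))
      rw [hstep, fold_none]
      rw [Prod.mk.injEq, Prod.mk.injEq]
      exact ⟨rfl, by simp; omega, (if_neg hnall).symm⟩

-- normalization: A's filterMap equals B's map-then-filter tag list
theorem norm_eq (l : List String) :
    l.filterMap (fun tag =>
      if PySem.Str.strip tag = "" then none
      else some (PySem.Str.lower (PySem.Str.strip tag)))
    = (l.map (fun x => PySem.Str.lower (PySem.Str.strip x))).filter (fun t => decide (t ≠ "")) := by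
  induction l with
  | nil => rfl
  | cons x xs ih =>
    simp only [List.filterMap_cons, List.map_cons, List.filter_cons]
    by_cases h : PySem.Str.strip x = ""
    · simp [h, ih, lower_eq_empty_iff]
    · simp [h, ih, lower_eq_empty_iff]

-- membership in one of A's three literal sets ⟺ the group classifier returns that label
theorem mem_uline (a : String) : a ∈ (["ua", "ub", "uc"] : List String) ↔ pvGroupOf a = some "u_line" := by
  unfold pvGroupOf; split_ifs <;> simp_all
theorem mem_i (a : String) : a ∈ (["ia", "ib", "ic"] : List String) ↔ pvGroupOf a = some "i" := by
  unfold pvGroupOf; split_ifs <;> (simp_all; try (rcases ‹_ ∨ _› with h | h | h <;> simp_all))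
theorem mem_uphase (a : String) : a ∈ (["uab", "ubc", "uca"] : List String) ↔ pvGroupOf a = some "u_phase" := by
  unfold pvGroupOf; split_ifs <;> (simp_all; try (rcases ‹_ ∨ _› with h | h | h <;> simp_all))

theorem subset_iff (T : List String) (keys : List String) (lbl : String)
    (hk : ∀ a : String, a ∈ keys ↔ pvGroupOf a = some lbl) :
    (PySem.Set.issubset (PySem.Set.ofList T) (PySem.Set.ofList keys) = true)
    ↔ ∀ a ∈ T, pvGroupOf a = some lbl := by
  rw [PySem.Set.issubset_iff]
  constructor
  · intro h a ha
    rw [← hk]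
    have := h a (by rw [PySem.Set.mem_ofList]; exact ha)
    rwa [PySem.Set.mem_ofList] at this
  · intro h a ha
    rw [PySem.Set.mem_ofList] at ha ⊢
    rw [hk]; exact h a ha

theorem not_all_of_head {lbl : String} (t u : String) (rest2 : List String)
    (hg : pvGroupOf t ≠ some lbl) :
    ¬ ∀ a ∈ t :: u :: rest2, pvGroupOf a = some lbl := by
  intro h
  exact hg (h t (by simp))

theorem ab_eq (rt : List String) :
    infer_data_type_from_requested_tags_py rt = infer_data_type_from_requested_tags_py_alt rt := by
  unfold infer_data_type_from_requested_tags_py infer_data_type_from_requested_tags_py_alt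
  rw [norm_eq, fold_filter]
  generalize (rt.map (fun x => PySem.Str.lower (PySem.Str.strip x))).filter (fun t => decide (t ≠ "")) = T
  cases T with
  | nil => simp
  | cons t rest =>
    have hfold : (t :: rest).foldl pvStep' (none, 0, none)
        = rest.foldl pvStep' (some t, 1, pvGroupOf t) := by
      simp [List.foldl_cons, pvStep']
    rw [hfold]
    cases rest with
    | nil =>
      cases hg : pvGroupOf t <;> simp
    | cons u rest2 =>
      have s1 := subset_iff (t :: u :: rest2) _ _ mem_uline
      have s2 := subset_iff (t :: u :: rest2) _ _ mem_i
      have s3 := subset_iff (t :: u :: rest2) _ _ mem_uphase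
      cases hg : pvGroupOf t with
      | none =>
        rw [fold_none]
        dsimp only
        rw [if_neg ((not_iff_not.mpr s1).mpr (not_all_of_head t u rest2 (by simp [hg]))),
            if_neg ((not_iff_not.mpr s2).mpr (not_all_of_head t u rest2 (by simp [hg]))),
            if_neg ((not_iff_not.mpr s3).mpr (not_all_of_head t u rest2 (by simp [hg]))),
            if_neg (by omega : ¬ ((1 : Int) + ((u :: rest2).length : Int) = 0)),
            if_pos (Or.inr rfl)]
      | some g =>
        rw [fold_some]
        dsimp only
        by_cases hall : ∀ a ∈ u :: rest2, pvGroupOf a = some g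
        · have hallT : ∀ a ∈ t :: u :: rest2, pvGroupOf a = some g := by
            intro a ha
            rcases List.mem_cons.mp ha with rfl | ha'
            · exact hg
            · exact hall a ha'
          have hgcases : g = "u_line" ∨ g = "i" ∨ g = "u_phase" := by
            revert hg; unfold pvGroupOf; split_ifs <;> simp_all
          rw [if_pos hall]
          rcases hgcases with rfl | rfl | rfl
          · rw [if_pos (s1.mpr hallT), if_neg (by simp : ¬ (t :: u :: rest2).length = 1),
                if_neg (by omega : ¬ ((1 : Int) + ((u :: rest2).length : Int) = 0)),
                if_neg (by simp; omega)]
          · rw [if_neg ((not_iff_not.mpr s1).mpr (not_all_of_head t u rest2 (by simp [hg]))),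
                if_pos (s2.mpr hallT), if_neg (by simp : ¬ (t :: u :: rest2).length = 1),
                if_neg (by omega : ¬ ((1 : Int) + ((u :: rest2).length : Int) = 0)),
                if_neg (by simp; omega)]
          · rw [if_neg ((not_iff_not.mpr s1).mpr (not_all_of_head t u rest2 (by simp [hg]))),
                if_neg ((not_iff_not.mpr s2).mpr (not_all_of_head t u rest2 (by simp [hg]))),
                if_pos (s3.mpr hallT), if_neg (by simp : ¬ (t :: u :: rest2).length = 1),
                if_neg (by omega : ¬ ((1 : Int) + ((u :: rest2).length : Int) = 0)),
                if_neg (by simp; omega)]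
        · have nall : ∀ lbl, ¬ ∀ a ∈ t :: u :: rest2, pvGroupOf a = some lbl := by
            intro lbl h
            apply hall
            intro a ha
            have ht := h t (by simp)
            rw [hg] at ht
            have := Option.some_inj.mp ht
            subst this
            exact h a (by simp [ha])
          rw [if_neg hall,
              if_neg ((not_iff_not.mpr s1).mpr (nall _)), if_neg ((not_iff_not.mpr s2).mpr (nall _)),
              if_neg ((not_iff_not.mpr s3).mpr (nall _)),
              if_neg (by omega : ¬ ((1 : Int) + ((u :: rest2).length : Int) = 0)),
              if_pos (Or.inr rfl)]

-- ===== VERDICT (by name: the statement is the Claim_ definition above) =====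
theorem infer_data_type_from_requested_tags_py_spec : Claim_equal_infer_data_type_from_requested_tags_py := by
  intro rt _
  exact ab_eq rt
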